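-- pv_equiv track=rewrite | github.com/3D-Printing-for-Microfluidics/pymfcad | pymfd/slicer/slicer.py | _match_or_find_closest_named_setting
-- ===== SOURCE A (Python) =====
-- def _match_or_find_closest_named_setting(
--     settings, named_settings, ignore_keys=None
-- ):
--     if ignore_keys is None:
--         ignore_keys = []
--
--     def dict_without_keys(d, keys):
--         return {k: v for k, v in d.items() if k not in keys}
--
--     settings_filtered = dict_without_keys(settings, ignore_keys)
--
--     best_match_key = None
--     fewest_differences = None
--     differences_in_best = {}
--
--     for key, _settings in named_settings.items():
--         _settings_filtered = dict_without_keys(_settings, ignore_keys)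
--
--         if settings_filtered == _settings_filtered:
--             # Exact match
--             return key, {}
--
--         # Calculate differences
--         differences = {
--             k: settings_filtered.get(k)
--             for k in set(settings_filtered) | set(_settings_filtered)
--             if settings_filtered.get(k) != _settings_filtered.get(k)
--         }
--
--         num_differences = len(differences)
--
--         if fewest_differences is None or num_differences < fewest_differences:
--             best_match_key = key
--             fewest_differences = num_differences
--             differences_in_best = differences
--
--     return best_match_key, differences_in_best
-- ===== SOURCE B (Python) =====
-- def _match_or_find_closest_named_setting(
--     settings, named_settings, ignore_keys=None
-- ):
--     ignored = set(ignore_keys or [])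
--
--     def filtered(d):
--         return {k: v for k, v in d.items() if k not in ignored}
--
--     target = filtered(settings)
--
--     def score(cand):
--         # number of differing keys, by counting alone:
--         # |target| + |cand| - (#keys shared) - (#items shared with equal value)
--         common = sum(1 for k in cand if k in target)
--         same = sum(1 for k, v in cand.items() if target.get(k) == v)
--         return len(target) + len(cand) - common - same
--
--     candidates = [(key, filtered(c)) for key, c in named_settings.items()]
--     if not candidates:
--         return None, {}
--     best_key, best = min(candidates, key=lambda kc: score(kc[1]))
--     return best_key, {
--         k: target.get(k)
--         for k in set(target) | set(best)
--         if target.get(k) != best.get(k)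
--     }
-- ===== Notes on version B (the rewrite author's own statement) =====
-- stated objective: faster
-- what changed: B never materializes a diff dict per candidate: it computes each candidate's number of differences purely arithmetically (|target|+|cand| minus the count of shared keys minus the count of shared equal items), picks the first-minimal scored candidate with min, and only then builds the single diff dict for the winner; A builds a set-union and diff dict for every candidate and threads a running best with an early exact-match return.
import Mathlib
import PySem

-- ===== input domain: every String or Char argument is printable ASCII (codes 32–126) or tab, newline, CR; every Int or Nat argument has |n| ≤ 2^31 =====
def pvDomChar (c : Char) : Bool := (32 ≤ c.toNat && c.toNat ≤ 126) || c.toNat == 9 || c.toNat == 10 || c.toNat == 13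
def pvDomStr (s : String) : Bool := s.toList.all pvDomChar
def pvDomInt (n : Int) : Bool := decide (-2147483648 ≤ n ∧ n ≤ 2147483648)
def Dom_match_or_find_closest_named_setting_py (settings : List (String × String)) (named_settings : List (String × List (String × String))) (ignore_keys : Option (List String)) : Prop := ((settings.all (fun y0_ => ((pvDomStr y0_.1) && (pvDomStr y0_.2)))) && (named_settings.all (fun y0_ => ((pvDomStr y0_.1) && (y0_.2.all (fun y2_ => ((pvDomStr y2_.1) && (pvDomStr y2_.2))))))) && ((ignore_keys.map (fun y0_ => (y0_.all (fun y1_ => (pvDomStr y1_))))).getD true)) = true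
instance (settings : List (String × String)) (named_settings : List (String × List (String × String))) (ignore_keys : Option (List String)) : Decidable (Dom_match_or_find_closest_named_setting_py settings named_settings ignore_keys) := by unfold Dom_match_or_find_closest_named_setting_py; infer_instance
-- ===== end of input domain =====

-- B is an alternative algorithm: it never builds a diff dict per candidate — it scores each
-- candidate arithmetically (|target|+|cand| − #shared keys − #shared equal items), picks the
-- first-minimal score with min, and builds the one diff dict for the winner only; A builds a
-- diff dict for every candidate and threads a running best with an early exact-match return.
-- Equivalence of the RETURN value is proved on all inputs; both ports build the diff dict in
-- the same deterministic key order (settings keys first, then new candidate keys), compared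
-- as a dict (order ignored) by the checker.

-- ===== PORT A =====

-- shared plumbing: dict lookup / dict-comprehension filter / the diff dict, exactly the
-- comprehensions both Pythons contain ('settings_filtered.get', 'dict_without_keys', 'differences')
def pvGet (l : List (String × String)) (k : String) : Option String :=
  (PySem.Dict.mk l).get? k

def pvFilt (d : List (String × String)) (ik : List String) : List (String × String) :=
  (PySem.Dict.ofList d).items.filter (fun kv => !(ik.contains kv.1))

def pvDiffs (sf cf : List (String × String)) : List (String × Option String) :=
  ((PySem.Set.ofList (sf.map Prod.fst ++ cf.map Prod.fst)).filter
      (fun k => !(pvGet sf k == pvGet cf k))).map (fun k => (k, pvGet sf k))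

-- A's for-loop over named_settings.items() with its running best/fewest/differences_in_best state;
-- Python's dict '==' (order-insensitive) is ported as equal length + agreement of every lookup.
def pvLoopA (sf : List (String × String)) (ik : List String)
    (cands : List (String × List (String × String)))
    (best : Option String) (fewest : Option Nat)
    (bestDiffs : List (String × Option String)) :
    Option String × List (String × Option String) :=
  match cands with
  | [] => (best, bestDiffs)
  | (key, s) :: rest =>
    let cf := pvFilt s ik
    if sf.length == cf.length && sf.all (fun kv => pvGet cf kv.1 == some kv.2) then
      (some key, [])
    else
      let diffs := pvDiffs sf cf
      let n := diffs.length
      match fewest with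
      | none => pvLoopA sf ik rest (some key) (some n) diffs
      | some f =>
        if n < f then pvLoopA sf ik rest (some key) (some n) diffs
        else pvLoopA sf ik rest best fewest bestDiffs

def match_or_find_closest_named_setting_py (settings : List (String × String)) (named_settings : List (String × List (String × String))) (ignore_keys : Option (List String)) : Option String × (List (String × Option String)) :=
  let ik := ignore_keys.getD []
  let sf := pvFilt settings ik
  pvLoopA sf ik named_settings none none []

-- ===== PORT B =====

-- Source B's 'score': |target| + |cand| − (#keys of cand present in target) − (#items of cand whose
-- value target maps their key to); 'k in target' is dict membership = a successful lookup,
-- 'sum(1 for … if p)' is countP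
def pvScore (sf cf : List (String × String)) : Nat :=
  sf.length + cf.length - cf.countP (fun kv => (pvGet sf kv.1).isSome)
    - cf.countP (fun kv => pvGet sf kv.1 == some kv.2)

def match_or_find_closest_named_setting_py_alt (settings : List (String × String)) (named_settings : List (String × List (String × String))) (ignore_keys : Option (List String)) : Option String × (List (String × Option String)) :=
  let ik := ignore_keys.getD []
  let sf := pvFilt settings ik
  let candidates := named_settings.map (fun kc => (kc.1, pvFilt kc.2 ik))
  match PySem.List.min? candidates (fun kc => pvScore sf kc.2) with
  | none => (none, [])
  | some kc => (some kc.1, pvDiffs sf kc.2)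

-- ===== PRECONDITION & SPEC =====
def Spec_match_or_find_closest_named_setting_py (settings : List (String × String)) (named_settings : List (String × List (String × String))) (ignore_keys : Option (List String)) (out : Option String × (List (String × Option String))) : Prop := out = match_or_find_closest_named_setting_py_alt settings named_settings ignore_keys
instance (settings : List (String × String)) (named_settings : List (String × List (String × String))) (ignore_keys : Option (List String)) (out : Option String × (List (String × Option String))) : Decidable (Spec_match_or_find_closest_named_setting_py settings named_settings ignore_keys out) := by unfold Spec_match_or_find_closest_named_setting_py; infer_instance

-- ===== CLAIM (what is proved, stated in full; the proofs are below) =====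
def Claim_equal_match_or_find_closest_named_setting_py : Prop := ∀ (settings : List (String × String)) (named_settings : List (String × List (String × String))) (ignore_keys : Option (List String)), Dom_match_or_find_closest_named_setting_py settings named_settings ignore_keys → Spec_match_or_find_closest_named_setting_py settings named_settings ignore_keys (match_or_find_closest_named_setting_py settings named_settings ignore_keys)

-- ===== LEMMAS AND PROOFS =====

theorem pvFilt_keys_nodup (d : List (String × String)) (ik : List String) :
    ((pvFilt d ik).map Prod.fst).Nodup := by
  have h1 : (PySem.Dict.ofList d).keys.Nodup := PySem.Dict.nodup_keys_ofList d
  have h2 : ((PySem.Dict.ofList d).items.filter (fun kv => !(ik.contains kv.1))).Sublist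
      (PySem.Dict.ofList d).items := List.filter_sublist
  exact (h2.map Prod.fst).nodup h1

theorem pvGet_eq_none_iff (l : List (String × String)) (k : String) :
    pvGet l k = none ↔ k ∉ l.map Prod.fst := by
  simpa using PySem.Dict.get?_eq_none_iff_not_mem_keys (PySem.Dict.mk l) k

theorem pvGet_of_mem (l : List (String × String)) {k v} (h : (k, v) ∈ l)
    (hn : (l.map Prod.fst).Nodup) : pvGet l k = some v := by
  exact PySem.Dict.get?_of_mem_items (d := PySem.Dict.mk l) h hn

theorem pvGet_mem (l : List (String × String)) {k v} (h : pvGet l k = some v) :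
    (k, v) ∈ l := by
  exact PySem.Dict.mem_items_of_get?_eq_some (d := PySem.Dict.mk l) h

-- Python's dict equality check of A is exactly "the diff dict is empty"
theorem pvEqcheck_iff (sf cf : List (String × String))
    (hs : (sf.map Prod.fst).Nodup) (hc : (cf.map Prod.fst).Nodup) :
    ((sf.length == cf.length && sf.all (fun kv => pvGet cf kv.1 == some kv.2)) = true)
      ↔ pvDiffs sf cf = [] := by
  have hdiff : pvDiffs sf cf = [] ↔ ∀ k, pvGet sf k = pvGet cf k := by
    unfold pvDiffs
    rw [List.map_eq_nil_iff, List.filter_eq_nil_iff]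
    constructor
    · intro h k
      by_cases hk : k ∈ sf.map Prod.fst ++ cf.map Prod.fst
      · have hk' : k ∈ PySem.Set.ofList (sf.map Prod.fst ++ cf.map Prod.fst) :=
          (PySem.Set.mem_ofList _ _).2 hk
        have := h k hk'
        simpa using this
      · rw [(pvGet_eq_none_iff sf k).2 (fun hm => hk (List.mem_append.2 (Or.inl hm))),
            (pvGet_eq_none_iff cf k).2 (fun hm => hk (List.mem_append.2 (Or.inr hm)))]
    · intro h k _
      simp [h k]
  rw [hdiff]
  constructor
  · intro h k
    rw [Bool.and_eq_true, beq_iff_eq, List.all_eq_true] at h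
    obtain ⟨hlen, hall⟩ := h
    have hsub : sf.map Prod.fst ⊆ cf.map Prod.fst := by
      intro k' hk'
      obtain ⟨⟨a, b⟩, hmem, rfl⟩ := List.mem_map.1 hk'
      have hab := hall _ hmem
      rw [beq_iff_eq] at hab
      exact List.mem_map.2 ⟨(a, b), pvGet_mem cf hab, rfl⟩
    have hperm : (sf.map Prod.fst).Perm (cf.map Prod.fst) :=
      (hs.subperm hsub).perm_of_length_le (by simpa using hlen.ge)
    cases hsfk : pvGet sf k with
    | some v =>
      have hab := hall _ (pvGet_mem sf hsfk)
      rw [beq_iff_eq] at hab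
      exact hab.symm
    | none =>
      have hk1 : k ∉ sf.map Prod.fst := (pvGet_eq_none_iff sf k).1 hsfk
      rw [(pvGet_eq_none_iff cf k).2 (fun h2 => hk1 (hperm.mem_iff.2 h2))]
  · intro h
    have hperm : (sf.map Prod.fst).Perm (cf.map Prod.fst) := by
      rw [List.perm_ext_iff_of_nodup hs hc]
      intro a
      constructor
      · intro ha
        obtain ⟨⟨x, y⟩, hm, rfl⟩ := List.mem_map.1 ha
        have hg : pvGet cf x = some y := (h x) ▸ pvGet_of_mem sf hm hs
        exact List.mem_map.2 ⟨(x, y), pvGet_mem cf hg, rfl⟩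
      · intro ha
        obtain ⟨⟨x, y⟩, hm, rfl⟩ := List.mem_map.1 ha
        have hg : pvGet sf x = some y := (h x).symm ▸ pvGet_of_mem cf hm hc
        exact List.mem_map.2 ⟨(x, y), pvGet_mem sf hg, rfl⟩
    rw [Bool.and_eq_true, beq_iff_eq, List.all_eq_true]
    refine ⟨by simpa using hperm.length_eq, fun kv hm => ?_⟩
    rw [beq_iff_eq, ← h kv.1]
    exact pvGet_of_mem sf (by exact hm) hs

-- B's arithmetic score is the number of differing keys (the length of A's diff dict)
theorem pvScore_eq_length (sf cf : List (String × String))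
    (hs : (sf.map Prod.fst).Nodup) (hc : (cf.map Prod.fst).Nodup) :
    pvScore sf cf = (pvDiffs sf cf).length := by
  classical
  set P : String → Bool := fun k => pvGet sf k == pvGet cf k with hP
  set U : List String := PySem.Set.ofList (sf.map Prod.fst ++ cf.map Prod.fst) with hU
  have hUnd : U.Nodup := PySem.Set.nodup_ofList _
  have hUmem : ∀ k, k ∈ U ↔ k ∈ sf.map Prod.fst ∨ k ∈ cf.map Prod.fst := by
    intro k
    rw [hU, PySem.Set.mem_ofList, List.mem_append]
  -- the diff length is the number of U-keys failing P
  have hdl : (pvDiffs sf cf).length = (U.filter (fun k => !(P k))).length := by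
    unfold pvDiffs
    rw [List.length_map]
  -- split U by P
  have hsplit : (U.filter P).length + (U.filter (fun k => !(P k))).length = U.length := by
    induction U with
    | nil => rfl
    | cons x t ih =>
      by_cases hx : P x = true <;> simp [hx] <;> omega
  -- U as a Finset is the union of the two key sets
  have hUfin : U.toFinset = (sf.map Prod.fst).toFinset ∪ (cf.map Prod.fst).toFinset := by
    ext k
    simp [hUmem k]
  have hUlen : U.length = U.toFinset.card := (List.toFinset_card_of_nodup hUnd).symm
  have hslen : (sf.map Prod.fst).toFinset.card = sf.length := by
    rw [List.toFinset_card_of_nodup hs, List.length_map]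
  have hclen : (cf.map Prod.fst).toFinset.card = cf.length := by
    rw [List.toFinset_card_of_nodup hc, List.length_map]
  -- 'common' counts the intersection of the two key sets
  have hcommon : cf.countP (fun kv => (pvGet sf kv.1).isSome)
      = ((cf.map Prod.fst).toFinset ∩ (sf.map Prod.fst).toFinset).card := by
    have h1 : cf.countP (fun kv => (pvGet sf kv.1).isSome)
        = (cf.map Prod.fst).countP (fun k => (pvGet sf k).isSome) := by
      rw [List.countP_map]; rfl
    rw [h1, List.countP_eq_length_filter]
    have hnd2 : ((cf.map Prod.fst).filter (fun k => (pvGet sf k).isSome)).Nodup :=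
      hc.filter _
    rw [← List.toFinset_card_of_nodup hnd2]
    apply congrArg Finset.card
    apply Finset.ext
    intro k
    rw [List.mem_toFinset, List.mem_filter, Finset.mem_inter, List.mem_toFinset,
        List.mem_toFinset]
    constructor
    · rintro ⟨hk, hp⟩
      refine ⟨hk, ?_⟩
      rcases Option.isSome_iff_exists.1 hp with ⟨v, hv⟩
      exact List.mem_map.2 ⟨(k, v), pvGet_mem sf hv, rfl⟩
    · rintro ⟨hk, hkm⟩
      refine ⟨hk, ?_⟩
      cases hg : pvGet sf k with
      | none => exact absurd hkm ((pvGet_eq_none_iff sf k).1 hg)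
      | some v => rfl
  -- 'same' counts the U-keys satisfying P
  have hsame : cf.countP (fun kv => pvGet sf kv.1 == some kv.2) = (U.filter P).length := by
    have h1 : cf.countP (fun kv => pvGet sf kv.1 == some kv.2)
        = cf.countP (fun kv => P kv.1) := by
      apply List.countP_congr
      intro kv hkv
      have hv : pvGet cf kv.1 = some kv.2 := pvGet_of_mem cf hkv hc
      simp [hP, hv]
    rw [h1]
    have h2 : cf.countP (fun kv => P kv.1) = (cf.map Prod.fst).countP P := by
      rw [List.countP_map]; rfl
    rw [h2, List.countP_eq_length_filter, ← List.toFinset_card_of_nodup (hc.filter P),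
        ← List.toFinset_card_of_nodup (hUnd.filter P)]
    apply congrArg Finset.card
    apply Finset.ext
    intro k
    rw [List.mem_toFinset, List.mem_toFinset, List.mem_filter, List.mem_filter]
    constructor
    · rintro ⟨hk, hp⟩
      exact ⟨(hUmem k).2 (Or.inr hk), hp⟩
    · rintro ⟨hk, hp⟩
      refine ⟨?_, hp⟩
      by_contra hnc
      have hcn : pvGet cf k = none := (pvGet_eq_none_iff cf k).2 hnc
      rw [hP] at hp
      simp only [hcn, beq_iff_eq] at hp
      have hsn : k ∉ sf.map Prod.fst := (pvGet_eq_none_iff sf k).1 hp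
      rcases (hUmem k).1 hk with h | h
      · exact hsn h
      · exact hnc h
  have hcard := Finset.card_union_add_card_inter
    ((sf.map Prod.fst).toFinset) ((cf.map Prod.fst).toFinset)
  rw [← hUfin] at hcard
  rw [Finset.inter_comm] at hcommon
  unfold pvScore
  omega

-- min with a key, written out: the running first-minimal fold
theorem pvMin?_cons {α : Type} (k : α → Nat) (x : α) (t : List α) :
    PySem.List.min? (x :: t) k
      = some (t.foldl (fun b y => if k y < k b then y else b) x) := by
  show List.foldl _ (some x) t = _
  induction t generalizing x with
  | nil => rfl
  | cons y t ih =>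
    simp only [List.foldl_cons]
    split <;> exact ih _

def pvStep (b x : String × List (String × Option String)) :
    String × List (String × Option String) :=
  if x.2.length < b.2.length then x else b

-- the per-candidate score fold corresponds, through building the diff dict, to the
-- per-candidate diff-length fold
theorem pvFold_map (sf : List (String × String)) (hs : (sf.map Prod.fst).Nodup) :
    ∀ (t : List (String × List (String × String))) (a : String × List (String × String)),
      (∀ kc ∈ a :: t, ((kc.2.map Prod.fst).Nodup)) →
      (fun kc : String × List (String × String) => (kc.1, pvDiffs sf kc.2))
          (t.foldl (fun b y => if pvScore sf y.2 < pvScore sf b.2 then y else b) a)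
        = (t.map (fun kc => (kc.1, pvDiffs sf kc.2))).foldl pvStep (a.1, pvDiffs sf a.2) := by
  intro t
  induction t with
  | nil => intro a _; rfl
  | cons y t ih =>
    intro a hnd
    have ha := hnd a List.mem_cons_self
    have hy := hnd y (List.mem_cons_of_mem a List.mem_cons_self)
    simp only [List.foldl_cons, List.map_cons, pvStep]
    rw [pvScore_eq_length sf a.2 hs ha, pvScore_eq_length sf y.2 hs hy]
    by_cases hlt : (pvDiffs sf y.2).length < (pvDiffs sf a.2).length
    · rw [if_pos hlt, if_pos hlt]
      exact ih y (fun kc hkc => hnd kc (List.mem_cons_of_mem a hkc))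
    · rw [if_neg hlt, if_neg hlt]
      refine ih a (fun kc hkc => hnd kc ?_)
      rcases List.mem_cons.1 hkc with h | h
      · exact h ▸ List.mem_cons_self
      · exact List.mem_cons_of_mem a (List.mem_cons_of_mem y h)

theorem pvFold_zero (t : List (String × List (String × Option String)))
    (acc : String × List (String × Option String)) (h : acc.2 = []) :
    t.foldl pvStep acc = acc := by
  induction t with
  | nil => rfl
  | cons y t ih =>
    simp only [List.foldl_cons, pvStep, h]
    simpa [pvStep, h] using ih

theorem pvLoopA_eq (sf : List (String × String)) (ik : List String)
    (hs : (sf.map Prod.fst).Nodup) :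
    ∀ (cs : List (String × List (String × String))) (bk : String)
      (bd : List (String × Option String)), bd ≠ [] →
      pvLoopA sf ik cs (some bk) (some bd.length) bd =
        (let m := (cs.map (fun kc => (kc.1, pvDiffs sf (pvFilt kc.2 ik)))).foldl pvStep (bk, bd)
         (some m.1, m.2)) := by
  intro cs
  induction cs with
  | nil => intro bk bd hbd; rfl
  | cons c rest ih =>
    intro bk bd hbd
    obtain ⟨key, s⟩ := c
    have hpos : 0 < bd.length := List.length_pos_iff.2 hbd
    by_cases hq : (sf.length == (pvFilt s ik).length &&
        sf.all (fun kv => pvGet (pvFilt s ik) kv.1 == some kv.2)) = true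
    · have hnil : pvDiffs sf (pvFilt s ik) = [] :=
        (pvEqcheck_iff sf (pvFilt s ik) hs (pvFilt_keys_nodup s ik)).1 hq
      simp only [pvLoopA, hq, if_true, List.map_cons, List.foldl_cons]
      rw [hnil]
      have hstep : pvStep (bk, bd) (key, []) = (key, []) := by
        simp [pvStep, hpos]
      rw [hstep, pvFold_zero (rest.map (fun kc => (kc.1, pvDiffs sf (pvFilt kc.2 ik)))) (key, []) rfl]
    · have hne : pvDiffs sf (pvFilt s ik) ≠ [] := fun he =>
        hq ((pvEqcheck_iff sf (pvFilt s ik) hs (pvFilt_keys_nodup s ik)).2 he)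
      simp only [pvLoopA, hq, if_false, Bool.false_eq_true, List.map_cons, List.foldl_cons]
      by_cases hlt : (pvDiffs sf (pvFilt s ik)).length < bd.length
      · rw [if_pos hlt]
        have hstep : pvStep (bk, bd) (key, pvDiffs sf (pvFilt s ik)) =
            (key, pvDiffs sf (pvFilt s ik)) := by simp [pvStep, hlt]
        rw [hstep]
        exact ih key (pvDiffs sf (pvFilt s ik)) hne
      · rw [if_neg hlt]
        have hstep : pvStep (bk, bd) (key, pvDiffs sf (pvFilt s ik)) = (bk, bd) := by
          simp [pvStep, hlt]
        rw [hstep]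
        exact ih bk bd hbd

-- B on a nonempty candidate list: min over scores, written as the score fold
theorem pvAltB_cons (settings : List (String × String)) (key : String)
    (s : List (String × String)) (rest : List (String × List (String × String)))
    (ik? : Option (List String)) :
    match_or_find_closest_named_setting_py_alt settings ((key, s) :: rest) ik? =
      (some ((rest.map (fun kc => (kc.1, pvFilt kc.2 (ik?.getD [])))).foldl
          (fun b y => if pvScore (pvFilt settings (ik?.getD [])) y.2
              < pvScore (pvFilt settings (ik?.getD [])) b.2 then y else b)
          (key, pvFilt s (ik?.getD []))).1,
       pvDiffs (pvFilt settings (ik?.getD []))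
         ((rest.map (fun kc => (kc.1, pvFilt kc.2 (ik?.getD [])))).foldl
          (fun b y => if pvScore (pvFilt settings (ik?.getD [])) y.2
              < pvScore (pvFilt settings (ik?.getD [])) b.2 then y else b)
          (key, pvFilt s (ik?.getD []))).2) := by
  unfold match_or_find_closest_named_setting_py_alt
  simp only [List.map_cons, pvMin?_cons]

-- ===== VERDICT (by name: the statement is the Claim_ definition above) =====
theorem match_or_find_closest_named_setting_py_spec : Claim_equal_match_or_find_closest_named_setting_py := by
  intro settings ns ik? _
  unfold Spec_match_or_find_closest_named_setting_py
  cases ns with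
  | nil => rfl
  | cons c rest =>
    obtain ⟨key, s⟩ := c
    rw [pvAltB_cons]
    have hs : ((pvFilt settings (ik?.getD [])).map Prod.fst).Nodup :=
      pvFilt_keys_nodup settings (ik?.getD [])
    set ik : List String := ik?.getD [] with hik
    set sf : List (String × String) := pvFilt settings ik with hsf
    set foldS : String × List (String × String) :=
      (rest.map (fun kc => (kc.1, pvFilt kc.2 ik))).foldl
        (fun b y => if pvScore sf y.2 < pvScore sf b.2 then y else b)
        (key, pvFilt s ik) with hfoldS
    set foldD : String × List (String × Option String) :=
      (rest.map (fun kc => (kc.1, pvDiffs sf (pvFilt kc.2 ik)))).foldl pvStep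
        (key, pvDiffs sf (pvFilt s ik)) with hfoldD
    -- the score fold maps, through the diff builder, to the diff-length fold
    have hnd : ∀ kc ∈ ((key, pvFilt s ik) :: rest.map (fun kc => (kc.1, pvFilt kc.2 ik))),
        ((kc.2.map Prod.fst).Nodup) := by
      intro kc hkc
      rcases List.mem_cons.1 hkc with h | h
      · rw [h]; exact pvFilt_keys_nodup s ik
      · obtain ⟨kc', _, rfl⟩ := List.mem_map.1 h
        exact pvFilt_keys_nodup kc'.2 ik
    have hfold := pvFold_map sf hs (rest.map (fun kc => (kc.1, pvFilt kc.2 ik)))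
      (key, pvFilt s ik) hnd
    rw [List.map_map] at hfold
    have hcomp : (rest.map ((fun kc : String × List (String × String) =>
          (kc.1, pvDiffs sf kc.2)) ∘ (fun kc => (kc.1, pvFilt kc.2 ik))))
        = rest.map (fun kc => (kc.1, pvDiffs sf (pvFilt kc.2 ik))) :=
      List.map_congr_left (fun kc _ => rfl)
    rw [hcomp] at hfold
    have h1 : foldS.1 = foldD.1 := congrArg Prod.fst hfold
    have h2 : pvDiffs sf foldS.2 = foldD.2 := congrArg Prod.snd hfold
    -- A's loop
    show pvLoopA sf ik ((key, s) :: rest) none none [] = (some foldS.1, pvDiffs sf foldS.2)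
    rw [h1, h2]
    by_cases hq : (sf.length == (pvFilt s ik).length &&
        sf.all (fun kv => pvGet (pvFilt s ik) kv.1 == some kv.2)) = true
    · have hnil : pvDiffs sf (pvFilt s ik) = [] :=
        (pvEqcheck_iff sf (pvFilt s ik) hs (pvFilt_keys_nodup s ik)).1 hq
      have hzero : foldD = (key, []) := by
        rw [hfoldD, hnil]
        exact pvFold_zero _ (key, []) rfl
      simp only [pvLoopA, hq, if_true]
      rw [hzero]
    · have hne : pvDiffs sf (pvFilt s ik) ≠ [] := fun he =>
        hq ((pvEqcheck_iff sf (pvFilt s ik) hs (pvFilt_keys_nodup s ik)).2 he)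
      simp only [pvLoopA, hq, if_false, Bool.false_eq_true]
      rw [pvLoopA_eq sf ik hs rest key (pvDiffs sf (pvFilt s ik)) hne]
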